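-- pv_equiv track=rewrite | github.com/goshtdev/upbge | doc/python_api/sphinx_stub_gen.py | find_rna_enum_words
-- ===== SOURCE A (Python) =====
-- def is_word_char(c: str) -> bool:
--     """Return True if *c* is alphanumeric or underscore (equivalent to ``\\w``)."""
--     return c.isalnum() or c == "_"
--
-- def find_rna_enum_words(text: str) -> list[str]:
--     """Find all ``rna_enum_...`` words in *text* at word boundaries."""
--     marker = "rna_enum_"
--     result: list[str] = []
--     pos = 0
--     length = len(text)
--     while True:
--         idx = text.find(marker, pos)
--         if idx == -1:
--             break
--         # Check word boundary before match.
--         if idx > 0 and is_word_char(text[idx - 1]):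
--             pos = idx + 1
--             continue
--         # Read to end of word.
--         end = idx + len(marker)
--         while end < length and is_word_char(text[end]):
--             end += 1
--         result.append(text[idx:end])
--         pos = end
--     return result
-- ===== SOURCE B (Python) =====
-- def find_rna_enum_words(text: str) -> list[str]:
--     """Find all ``rna_enum_...`` words in *text* at word boundaries.
--
--     Single left-to-right scan accumulating maximal runs of word characters
--     (alphanumeric or underscore); each completed run is kept iff it starts
--     with the marker.  No searching/backtracking via str.find.
--     """
--     marker = "rna_enum_"
--     result: list[str] = []
--     run = ""
--     for c in text:
--         if c.isalnum() or c == "_":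
--             run += c
--         else:
--             if run and run.startswith(marker):
--                 result.append(run)
--             run = ""
--     if run and run.startswith(marker):
--         result.append(run)
--     return result
-- ===== Notes on version B (the rewrite author's own statement) =====
-- stated objective: alternative
-- what changed: Replaced the find()-and-skip loop (repeated substring search with boundary re-checks and an inner end-of-word scan) by a single char-by-char scan that accumulates maximal word-character runs and keeps each run that starts with the marker.
import Mathlib
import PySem

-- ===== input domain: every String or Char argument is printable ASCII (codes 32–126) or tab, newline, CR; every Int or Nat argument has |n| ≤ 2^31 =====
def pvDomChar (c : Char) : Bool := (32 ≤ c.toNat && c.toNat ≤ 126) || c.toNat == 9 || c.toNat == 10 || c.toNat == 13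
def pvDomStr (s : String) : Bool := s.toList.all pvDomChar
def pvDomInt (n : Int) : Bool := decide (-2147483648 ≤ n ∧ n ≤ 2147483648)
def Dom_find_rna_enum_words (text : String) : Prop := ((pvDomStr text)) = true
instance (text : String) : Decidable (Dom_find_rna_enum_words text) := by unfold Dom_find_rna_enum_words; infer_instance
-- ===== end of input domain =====

-- B replaces A's find()-and-skip search loop by a single char-by-char scan over maximal
-- word-character runs, keeping each run that starts with the marker (alternative algorithm).

-- ===== PORT A =====
-- is_word_char(c): c.isalnum() or c == "_"
def isWordChar (c : Char) : Bool := PySem.Chars.isalnum c || c == '_'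

-- marker = "rna_enum_"
def markerChars : List Char := ['r', 'n', 'a', '_', 'e', 'n', 'u', 'm', '_']

-- inner loop: while end < length and is_word_char(text[end]): end += 1
def wordEndA (text : List Char) (e : Nat) : Nat :=
  if h : e < text.length then
    if isWordChar text[e] then wordEndA text (e + 1) else e
  else e
termination_by text.length - e
decreasing_by omega

-- outer `while True` loop of A; fuel is an upper bound on the remaining iterations
-- (pos strictly increases each iteration and stays ≤ length, so length + 1 suffices)
def loopA (text : List Char) (fuel pos : Nat) (result : List (List Char)) : List (List Char) :=
  match fuel with
  | 0 => result
  | fuel + 1 =>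
    let idx := PySem.Chars.findFrom text markerChars (pos : Int) none
    if idx = -1 then result
    else
      let i := idx.toNat
      if 0 < i && isWordChar (text.getD (i - 1) ' ') then
        loopA text fuel (i + 1) result
      else
        let e := wordEndA text (i + markerChars.length)
        loopA text fuel e (result ++ [PySem.List.slice text (some (i : Int)) (some (e : Int))])

def find_rna_enum_words (text : String) : List String :=
  (loopA text.toList (text.toList.length + 1) 0 []).map String.ofList

-- ===== PORT B =====
-- flush the current run: keep it iff nonempty and it starts with the marker
def flushB (run : List Char) (acc : List (List Char)) : List (List Char) :=
  if decide (run ≠ []) && markerChars.isPrefixOf run then acc ++ [run] else acc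

-- the single pass: accumulate word-character runs into `run`, flush at run boundaries
def scanB (s : List Char) (run : List Char) (acc : List (List Char)) : List (List Char) :=
  match s with
  | [] => flushB run acc
  | c :: t => if isWordChar c then scanB t (run ++ [c]) acc else scanB t [] (flushB run acc)

def find_rna_enum_words_alt (text : String) : List String :=
  (scanB text.toList [] []).map String.ofList

-- ===== PRECONDITION & SPEC =====
def Spec_find_rna_enum_words (text : String) (out : List String) : Prop := out = find_rna_enum_words_alt text
instance (text : String) (out : List String) : Decidable (Spec_find_rna_enum_words text out) := by unfold Spec_find_rna_enum_words; infer_instance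

-- ===== CLAIM (what is proved, stated in full; the proofs are below) =====
def Claim_equal_find_rna_enum_words : Prop := ∀ (text : String), Dom_find_rna_enum_words text → Spec_find_rna_enum_words text (find_rna_enum_words text)

-- ===== LEMMAS AND PROOFS =====

-- the word-boundary flag looked at by A just before position `pos`
def flagAt (text : List Char) (pos : Nat) : Bool :=
  decide (0 < pos) && isWordChar (text.getD (pos - 1) ' ')

lemma marker_prefix_takeWhile_ne_nil {s : List Char} (h : markerChars <+: s) :
    s.takeWhile isWordChar ≠ [] := by
  obtain ⟨v, rfl⟩ := h
  simp [markerChars, List.takeWhile_cons, isWordChar, show PySem.Chars.isalnum 'r' = true from by decide]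

-- reference recursion: the common meaning of both programs, char by char with a boundary flag
def specR (s : List Char) (b : Bool) : List (List Char) :=
  match s with
  | [] => []
  | c :: t =>
    if !b && markerChars.isPrefixOf (c :: t) then
      (c :: t).takeWhile isWordChar ::
        specR ((c :: t).drop ((c :: t).takeWhile isWordChar).length) true
    else specR t (isWordChar c)
termination_by s.length
decreasing_by
  · have hne : (c :: t).takeWhile isWordChar ≠ [] := by
      apply marker_prefix_takeWhile_ne_nil
      simpa using (List.isPrefixOf_iff_prefix.mp (by simp_all))
    have := List.length_pos_iff.mpr hne
    simp
    omega
  · simp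

lemma takeWhile_of_word_prefix {p s : List Char} (hp : p <+: s) (hw : p.all isWordChar = true) :
    s.takeWhile isWordChar = p ++ (s.drop p.length).takeWhile isWordChar := by
  induction p generalizing s with
  | nil => simp
  | cons c p ih =>
    obtain ⟨v, rfl⟩ := hp
    simp only [List.all_cons, Bool.and_eq_true] at hw
    simp [hw.1, ih (List.prefix_append p v) hw.2]

lemma specR_skip (j : Nat) (s : List Char) (b : Bool) (hj : j ≤ s.length)
    (h : ∀ i, i < j → ¬ markerChars <+: s.drop i) :
    specR s b = specR (s.drop j) (if j = 0 then b else isWordChar (s.getD (j - 1) ' ')) := by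
  induction j generalizing s b with
  | zero => simp
  | succ j ih =>
    match s with
    | [] => simp at hj
    | c :: t =>
      rw [specR]
      have h0 : ¬ markerChars <+: (c :: t) := h 0 (by omega)
      have hpre : markerChars.isPrefixOf (c :: t) = false := by
        by_contra hx
        exact h0 (List.isPrefixOf_iff_prefix.mp (by simpa using hx))
      rw [hpre]
      simp only [Bool.and_false, Bool.false_eq_true, ↓reduceIte]
      rw [ih t (isWordChar c) (by simpa using hj)
        (fun i hi => by simpa using h (i + 1) (by omega))]
      rcases Nat.eq_zero_or_pos j with hj0 | hjp
      · subst hj0; simp [List.getD]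
      · have hne : j ≠ 0 := by omega
        have hgd : (c :: t).getD (j + 1 - 1) ' ' = t.getD (j - 1) ' ' := by
          rw [show j + 1 - 1 = (j - 1) + 1 from by omega, List.getD_cons_succ]
        simp only [hne, ↓reduceIte, Nat.succ_ne_zero, List.drop_succ_cons, hgd]

lemma specR_run_skip (w r : List Char) (hw : w.all isWordChar = true) :
    specR (w ++ r) true = specR r true := by
  induction w with
  | nil => rfl
  | cons c t ih =>
    simp only [List.all_cons, Bool.and_eq_true] at hw
    rw [List.cons_append, specR]
    simp [hw.1, ih hw.2]

lemma wordEndA_eq (text : List Char) (e : Nat) (he : e ≤ text.length) :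
    wordEndA text e = e + ((text.drop e).takeWhile isWordChar).length := by
  fun_induction wordEndA text e with
  | case1 e h hw ih =>
    simp only [List.drop_eq_getElem_cons h, List.takeWhile_cons, hw, if_true,
      List.length_cons]
    rw [ih (by omega)]
    omega
  | case2 e h hw =>
    have hw' : isWordChar text[e] = false := by simpa using hw
    rw [List.drop_eq_getElem_cons h, List.takeWhile_cons, hw']
    simp
  | case3 e h =>
    have : text.drop e = [] := List.drop_eq_nil_of_le (by omega)
    simp [this]

lemma marker_all_word : markerChars.all isWordChar = true := by decide

lemma loopA_eq (text : List Char) (fuel pos : Nat) (res : List (List Char))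
    (hpos : pos ≤ text.length) (hfuel : text.length - pos < fuel) :
    loopA text fuel pos res = res ++ specR (text.drop pos) (flagAt text pos) := by
  induction fuel generalizing pos res with
  | zero => omega
  | succ fuel ih =>
    by_cases hf : PySem.Chars.findFrom text markerChars (pos : Int) none = -1
    · -- no further occurrence: A stops, specR consumes the rest emitting nothing
      have hni : ¬ markerChars <:+: text.drop pos :=
        (PySem.Chars.findFrom_natCast_eq_neg_one_iff text markerChars pos hpos).mp hf
      have hskip : ∀ i, i < (text.drop pos).length → ¬ markerChars <+: (text.drop pos).drop i := by
        intro i _ hp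
        exact hni (hp.isInfix.trans (List.drop_suffix i (text.drop pos)).isInfix)
      rw [specR_skip (text.drop pos).length _ _ (le_refl _) hskip, List.drop_length]
      simp only [loopA, hf, ↓reduceIte]
      rw [specR]
      simp
    · -- an occurrence at index q = findFrom … ≥ pos
      obtain ⟨hle, hpre, hmin⟩ :=
        PySem.Chars.findFrom_natCast_spec text markerChars pos hpos hf
      set q := (PySem.Chars.findFrom text markerChars (pos : Int) none).toNat with hq
      have hnn : (0 : Int) ≤ PySem.Chars.findFrom text markerChars (pos : Int) none :=
        le_trans (by positivity) hle
      have hcast : ((q : Nat) : Int) = PySem.Chars.findFrom text markerChars (pos : Int) none :=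
        Int.toNat_of_nonneg hnn
      clear_value q
      have hposq : pos ≤ q := by omega
      have hmlen : markerChars.length = 9 := by decide
      have hqlen : q + markerChars.length ≤ text.length := by
        have h1 := hpre.length_le
        rw [List.length_drop, hmlen] at h1
        omega
      have hqlt : q < text.length := by omega
      have hskip : ∀ i, i < q - pos → ¬ markerChars <+: (text.drop pos).drop i := by
        intro i hi
        rw [List.drop_drop]
        exact hmin (pos + i) (by omega) (by omega)
      have hdq : (text.drop pos).drop (q - pos) = text.drop q := by
        rw [List.drop_drop]; congr 1; omega
      have hflag : (if q - pos = 0 then flagAt text pos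
          else isWordChar ((text.drop pos).getD (q - pos - 1) ' ')) = flagAt text q := by
        rcases Nat.eq_zero_or_pos (q - pos) with h0 | hp0
        · have : q = pos := by omega
          simp [this]
        · have hne : q - pos ≠ 0 := by omega
          simp only [hne, ↓reduceIte, flagAt]
          have hgd : (text.drop pos).getD (q - pos - 1) ' ' = text.getD (q - 1) ' ' := by
            have hppq : pos + (q - pos - 1) = q - 1 := by omega
            rw [List.getD, List.getD, List.getElem?_drop, hppq]
          have h0q : decide (0 < q) = true := by simp; omega
          rw [hgd, h0q, Bool.true_and]
      rw [specR_skip (q - pos) _ _ (by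
        rw [List.length_drop]
        exact Nat.sub_le_sub_right (le_of_lt hqlt) pos) hskip, hdq, hflag]
      -- the port's boundary guard is exactly flagAt text q
      by_cases hg : flagAt text q = true
      · -- boundary fails: A skips to q+1; specR steps over text[q] = 'r'
        have hstep : loopA text (fuel + 1) pos res = loopA text fuel (q + 1) res := by
          simp only [loopA, hf, ↓reduceIte, ← hq]
          have hgb : (decide (0 < q) && isWordChar (text.getD (q - 1) ' ')) = true := hg
          rw [if_pos hgb]
        rw [hstep, ih (q + 1) res (by omega) (by omega)]
        obtain ⟨v, hv⟩ := hpre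
        have hv' : text.drop q = 'r' :: (['n', 'a', '_', 'e', 'n', 'u', 'm', '_'] ++ v) := by
          rw [← hv]; rfl
        rw [hv', specR]
        rw [if_neg (by simp [hg])]
        have htail : ['n', 'a', '_', 'e', 'n', 'u', 'm', '_'] ++ v = text.drop (q + 1) := by
          have h5 := List.tail_drop (l := text) (i := q)
          rw [hv'] at h5
          simpa using h5
        have hflag1 : isWordChar 'r' = flagAt text (q + 1) := by
          have hq? : text[q]? = some 'r' := by
            have h0 := List.getElem?_drop (xs := text) (i := q) (j := 0)
            rw [hv'] at h0
            simpa using h0.symm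
          simp [flagAt, List.getD, hq?]
        rw [htail, hflag1]
      · -- word boundary: A emits text[q:e] and jumps to e; specR emits the run
        have hg' : flagAt text q = false := by simpa using hg
        set w := (text.drop q).takeWhile isWordChar with hwdef
        have htw : w = markerChars ++ ((text.drop (q + 9)).takeWhile isWordChar) := by
          rw [hwdef, takeWhile_of_word_prefix hpre marker_all_word, hmlen,
            List.drop_drop]
        have hwlen : w.length = 9 + ((text.drop (q + 9)).takeWhile isWordChar).length := by
          rw [htw]; simp [hmlen]
        have hwpre : w <+: text.drop q := List.takeWhile_prefix _
        have hwlenle : w.length ≤ text.length - q := by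
          have := hwpre.length_le
          rwa [List.length_drop] at this
        have he : wordEndA text (q + markerChars.length) = q + w.length := by
          rw [hmlen, wordEndA_eq text (q + 9) (by omega)]
          omega
        have hslice : PySem.List.slice text (some (q : Int)) (some ((q + w.length : Nat) : Int)) = w := by
          rw [PySem.List.slice_natCast]
          have : q + w.length - q = w.length := by omega
          rw [this, (List.prefix_iff_eq_take.mp hwpre).symm]
        have hstep : loopA text (fuel + 1) pos res =
            loopA text fuel (q + w.length) (res ++ [w]) := by
          simp only [loopA, hf, ↓reduceIte, ← hq]
          have hgb : (decide (0 < q) && isWordChar (text.getD (q - 1) ' ')) = false := hg'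
          have hgb' : ¬ ((decide (0 < q) && isWordChar (text.getD (q - 1) ' ')) = true) := by
            rw [hgb]; simp
          rw [if_neg hgb', he, hslice]
        rw [hstep, ih (q + w.length) (res ++ [w]) (by omega) (by omega)]
        -- specR fires on the marker occurrence
        obtain ⟨v, hv⟩ := hpre
        have hv' : text.drop q = 'r' :: (['n', 'a', '_', 'e', 'n', 'u', 'm', '_'] ++ v) := by
          rw [← hv]; rfl
        have hwne : w ≠ [] := by
          rw [htw]; simp [markerChars]
        have hflagE : flagAt text (q + w.length) = true := by
          have hidx : text.getD (q + w.length - 1) ' ' = w[w.length - 1]'(by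
              have := List.length_pos_iff.mpr hwne; omega) := by
            obtain ⟨u, hu⟩ := hwpre
            rw [List.getD]
            have h1 : text[q + (w.length - 1)]? = (text.drop q)[w.length - 1]? :=
              (List.getElem?_drop).symm
            have h2 : (text.drop q)[w.length - 1]? = w[w.length - 1]? := by
              rw [← hu, List.getElem?_append_left (by
                have := List.length_pos_iff.mpr hwne; omega)]
            have h3 : w[w.length - 1]? = some (w[w.length - 1]'(by
                have := List.length_pos_iff.mpr hwne; omega)) :=
              List.getElem?_eq_getElem _
            have h4 : q + w.length - 1 = q + (w.length - 1) := by
              have := List.length_pos_iff.mpr hwne; omega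
            rw [h4, h1, h2, h3]
            rfl
          have hword : isWordChar (w[w.length - 1]'(by
              have := List.length_pos_iff.mpr hwne; omega)) = true := by
            have hall := List.all_takeWhile (l := text.drop q) (p := isWordChar)
            rw [List.all_eq_true] at hall
            exact hall _ (by rw [← hwdef]; exact List.getElem_mem _)
          have h0e : decide (0 < q + w.length) = true := by
            simp
            have := List.length_pos_iff.mpr hwne
            omega
          rw [flagAt, hidx, hword, h0e, Bool.true_and]
        rw [hv', specR]
        rw [if_pos (by
          rw [Bool.and_eq_true]
          refine ⟨by simp [hg'], ?_⟩
          rw [List.isPrefixOf_iff_prefix, ← hv']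
          exact ⟨v, hv⟩)]
        rw [← hv']
        rw [← hwdef, List.drop_drop, hflagE]
        simp

lemma flushB_acc (run : List Char) (acc : List (List Char)) :
    flushB run acc = acc ++ flushB run [] := by
  unfold flushB; split_ifs <;> simp

lemma scanB_acc (s : List Char) (run : List Char) (acc : List (List Char)) :
    scanB s run acc = acc ++ scanB s run [] := by
  induction s generalizing run acc with
  | nil => simpa [scanB] using flushB_acc run acc
  | cons c t ih =>
    by_cases hc : isWordChar c
    · rw [scanB, scanB]; simp only [hc, ↓reduceIte]; exact ih _ _
    · rw [scanB, scanB]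
      simp only [hc, Bool.false_eq_true, ↓reduceIte]
      rw [ih, flushB_acc, ih [] (flushB run []), List.append_assoc]

lemma scanB_run (w r run : List Char) (acc : List (List Char)) (hw : w.all isWordChar = true) :
    scanB (w ++ r) run acc = scanB r (run ++ w) acc := by
  induction w generalizing run with
  | nil => simp
  | cons c t ih =>
    simp only [List.all_cons, Bool.and_eq_true] at hw
    rw [List.cons_append, scanB]
    simp [hw.1, ih _ hw.2]

lemma not_marker_prefix_of_nonword {c : Char} {t : List Char} (hc : isWordChar c = false) :
    ¬ markerChars <+: (c :: t) := by
  intro h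
  obtain ⟨v, hv⟩ := h
  rw [markerChars, List.cons_append, List.cons.injEq] at hv
  rw [← hv.1] at hc
  exact absurd hc (by decide)

lemma drop_takeWhile_length (p : Char → Bool) (l : List Char) :
    List.drop (List.takeWhile p l).length l = List.dropWhile p l := by
  induction l with
  | nil => simp
  | cons c t ih =>
    by_cases hc : p c <;> simp [hc, ih]

lemma dropWhile_head_false (p : Char → Bool) (l : List Char) (d : Char) (t : List Char)
    (h : l.dropWhile p = d :: t) : p d = false := by
  induction l with
  | nil => simp at h
  | cons c u ih =>
    rw [List.dropWhile_cons] at h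
    by_cases hc : p c
    · simp [hc] at h; exact ih h
    · simp [hc] at h; simp [← h.1]; simpa using hc

lemma scanB_eq_specR (s : List Char) : scanB s [] [] = specR s false := by
  generalize hn : s.length = n
  induction n using Nat.strong_induction_on generalizing s with
  | _ n ih =>
  match s with
  | [] => simp [scanB, flushB, specR]
  | c :: t =>
    by_cases hc : isWordChar c
    · -- word-character: accumulate the whole run
      have hw : (c :: t).takeWhile isWordChar = c :: t.takeWhile isWordChar := by
        simp [hc]
      have hr : (c :: t).dropWhile isWordChar = t.dropWhile isWordChar := by
        simp [hc]
      have hall : ((c :: t).takeWhile isWordChar).all isWordChar = true :=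
        List.all_takeWhile
      have hsplit : (c :: t) = (c :: t).takeWhile isWordChar ++ (c :: t).dropWhile isWordChar :=
        (List.takeWhile_append_dropWhile).symm
      -- B side: run through the whole word run
      have hB : scanB (c :: t) [] [] =
          scanB ((c :: t).dropWhile isWordChar) ((c :: t).takeWhile isWordChar) [] := by
        conv_lhs => rw [hsplit]
        rw [scanB_run _ _ _ _ hall]
        simp
      -- specR side, split on whether the marker starts here
      by_cases hm : markerChars <+: (c :: t)
      · have htw : (c :: t).takeWhile isWordChar =
            markerChars ++ (((c :: t).drop markerChars.length).takeWhile isWordChar) :=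
          takeWhile_of_word_prefix hm marker_all_word
        have hmw : markerChars <+: (c :: t).takeWhile isWordChar := htw ▸ List.prefix_append _ _
        have hflush : flushB ((c :: t).takeWhile isWordChar) [] = [(c :: t).takeWhile isWordChar] := by
          unfold flushB
          rw [if_pos]
          · simp
          · simp only [Bool.and_eq_true, decide_eq_true_eq]
            exact ⟨by simp [hw], List.isPrefixOf_iff_prefix.mpr hmw⟩
        have hspec : specR (c :: t) false =
            (c :: t).takeWhile isWordChar ::
              specR ((c :: t).dropWhile isWordChar) true := by
          rw [specR, if_pos (by simp [List.isPrefixOf_iff_prefix.mpr hm]),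
            drop_takeWhile_length]
        rw [hB, hspec]
        rcases hd : (c :: t).dropWhile isWordChar with _ | ⟨d, t'⟩
        · rw [scanB, hflush, specR]
        · have hdw : isWordChar d = false := dropWhile_head_false _ _ _ _ hd
          rw [scanB, hdw]
          simp only [Bool.false_eq_true, ↓reduceIte]
          rw [scanB_acc, hflush, specR]
          simp only [hdw]
          have hlen : t'.length < n := by
            have h2 := congrArg List.length hsplit
            rw [hd] at h2
            simp only [List.length_cons, List.length_append] at h2 hn
            omega
          rw [ih t'.length hlen t' rfl]
          rfl
      · have hflush : flushB ((c :: t).takeWhile isWordChar) [] = [] := by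
          unfold flushB
          rw [if_neg]
          intro hx
          simp only [Bool.and_eq_true, decide_eq_true_eq] at hx
          exact hm ((List.isPrefixOf_iff_prefix.mp hx.2).trans (List.takeWhile_prefix _))
        have hspec : specR (c :: t) false = specR ((c :: t).dropWhile isWordChar) true := by
          rw [specR, if_neg (by simp [hm])]
          · rw [hc, hw] at *
            calc specR t true = specR (t.takeWhile isWordChar ++ t.dropWhile isWordChar) true := by
                  rw [List.takeWhile_append_dropWhile]
              _ = specR (t.dropWhile isWordChar) true := specR_run_skip _ _ List.all_takeWhile
              _ = specR ((c :: t).dropWhile isWordChar) true := by rw [hr]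
        rw [hB, hspec]
        rcases hd : (c :: t).dropWhile isWordChar with _ | ⟨d, t'⟩
        · rw [scanB, hflush, specR]
        · have hdw : isWordChar d = false := dropWhile_head_false _ _ _ _ hd
          rw [scanB, hdw]
          simp only [Bool.false_eq_true, ↓reduceIte]
          rw [scanB_acc, hflush, specR]
          simp only [hdw]
          have hlen : t'.length < n := by
            have h2 := congrArg List.length hsplit
            rw [hd] at h2
            simp only [List.length_cons, List.length_append] at h2 hn
            omega
          rw [ih t'.length hlen t' rfl]
          rfl
    · -- non-word character: both just step over it
      have hc' : isWordChar c = false := by simpa using hc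
      rw [scanB]
      simp only [hc', Bool.false_eq_true, ↓reduceIte]
      rw [specR, if_neg (by
        simp only [Bool.and_eq_true]
        intro hx
        exact not_marker_prefix_of_nonword hc' (List.isPrefixOf_iff_prefix.mp hx.2)), hc']
      have : flushB [] [] = [] := rfl
      rw [this]
      exact ih t.length (by simp at hn; omega) t rfl

-- ===== VERDICT (by name: the statement is the Claim_ definition above) =====
theorem find_rna_enum_words_spec : Claim_equal_find_rna_enum_words := by
  intro text _
  unfold Spec_find_rna_enum_words find_rna_enum_words find_rna_enum_words_alt
  rw [loopA_eq text.toList (text.toList.length + 1) 0 [] (by omega) (by omega),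
    scanB_eq_specR]
  simp [flagAt]
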